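-- pv_equiv track=rewrite | github.com/ParkJeongmiin/Algorithm | 프로그래머스/3/258709. 주사위 고르기/주사위 고르기.py | solution
-- ===== SOURCE A (Python) =====
-- from itertools import combinations
--
-- def binary_search(target, case):
--     '''특정 값 미만의 눈 갯수를 탐색하는 이진탐색 함수'''
--     low = 0
--     high = len(case) - 1
--
--     while low <= high:
--         mid = (low + high) // 2
--
--         if case[mid] < target:
--             low = mid + 1
--         else:
--             high = mid - 1
--
--     return low
--
-- def simulation_score(case, dice, out, idx, now):
--     if idx == len(case):
--         out.append(now)
--         return
--
--     for val in dice[case[idx]]: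
--         simulation_score(case, dice, out, idx + 1, now + val)
--
-- def solution(dice):
--     answer = []
--
--     # 가능한 주사위 조합 계산
--     dice_idx = list(range(len(dice)))
--     dice_combinations = list(combinations(dice_idx, len(dice) // 2))
--
--     # 주사위 조합 별 합 경우의 수 계산
--     scores = {}
--     for idx, case in enumerate(dice_combinations):
--         out = []
--         simulation_score(case, dice, out, idx=0, now=0)
--         out.sort()      # 이분 탐색을 위한 정렬
--         scores[idx] = out
--
--     # 조합 중에서 가장 많이 이기는 경우 검색
--     best_sum = 0
--     for key, val in scores.items():
--         now_case = val      # 현재 케이스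
--         other_case = scores[len(dice_combinations) - key - 1]   # 상대방 케이스
--
--         # 현재 케이스를 기준으로 상대방을 이기는 횟수 계산
--         temp_sum = 0
--         for c in now_case:
--             temp_sum += binary_search(c, other_case)
--
--         # 최고기록과 비교해 정답 갱신
--         if temp_sum > best_sum:
--             best_sum = temp_sum
--             best_case = dice_combinations[key]
--             answer = list(map(lambda x: x + 1, sorted(best_case)))
--
--     return answer
-- ===== SOURCE B (Python) =====
-- from itertools import combinations
--
-- def solution(dice):
--     n = len(dice)
--     combs = list(combinations(range(n), n // 2))
--     C = len(combs)
--
--     # all attainable sums per combination, sorted (iterative product instead of recursion)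
--     sums = []
--     for case in combs:
--         out = [0]
--         for i in case:
--             out = [s + v for s in out for v in dice[i]]
--         out.sort()
--         sums.append(out)
--
--     answer = []
--     best = 0
--     for i in range(C):
--         mine = sums[i]
--         other = sums[C - 1 - i]          # the complementary combination
--         # single two-pointer merge count instead of per-element binary search
--         wins = 0
--         j = 0
--         for a in mine:
--             while j < len(other) and other[j] < a:
--                 j += 1
--             wins += j
--         if wins > best:
--             best = wins
--             answer = [x + 1 for x in combs[i]]
--     return answer
-- ===== Notes on version B (the rewrite author's own statement) =====
-- stated objective: alternative
-- what changed: B replaces A's recursive DFS sum enumeration by an iterative product fold and A's per-element binary search over the complementary sum list by a single two-pointer merge count (intended as faster; measured 3.67x at n=64, but both programs are dominated by the exponential sum enumeration and time out at n=256, so the probe could not confirm it at the largest size).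
import Mathlib
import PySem

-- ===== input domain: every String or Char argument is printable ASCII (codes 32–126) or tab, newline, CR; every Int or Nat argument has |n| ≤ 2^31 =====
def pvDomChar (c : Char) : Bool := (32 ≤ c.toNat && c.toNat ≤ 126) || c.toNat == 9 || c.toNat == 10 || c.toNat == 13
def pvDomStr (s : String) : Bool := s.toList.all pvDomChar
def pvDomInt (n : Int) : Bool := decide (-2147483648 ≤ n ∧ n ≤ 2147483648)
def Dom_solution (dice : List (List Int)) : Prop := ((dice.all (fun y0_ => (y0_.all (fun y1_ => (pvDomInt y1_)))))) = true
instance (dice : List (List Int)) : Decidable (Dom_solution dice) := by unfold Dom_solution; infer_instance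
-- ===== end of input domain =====

-- B replaces A's recursive sum enumeration by an iterative product fold and A's per-element
-- binary search over the complementary sum list by a single two-pointer merge count
-- (alternative algorithm; same overall cost class, dominated by the sort of each sum list).


-- ===== PORT A =====
-- binary_search's while-loop; case[mid] read with pyGetD (mid is always in range whenever the
-- loop body runs on A's calls, where 0 ≤ low ≤ high ≤ len(case)-1 — exact).
def bsLoop (target : Int) (case : List Int) (low high : Int) : Int :=
  if _h : low ≤ high then
    let mid := PySem.Int.floordiv (low + high) 2
    if PySem.List.pyGetD case mid 0 < target then
      bsLoop target case (mid + 1) high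
    else
      bsLoop target case low (mid - 1)
  else low
termination_by (high + 1 - low).toNat
decreasing_by
  · have h2 := PySem.Int.floordiv_two_mid_bounds _h; omega
  · have h2 := PySem.Int.floordiv_two_mid_bounds _h; omega

def binarySearch (target : Int) (case : List Int) : Int :=
  bsLoop target case 0 ((case.length : Int) - 1)

-- simulation_score recurses on idx from 0 to len(case); ported as structural recursion on the
-- suffix case[idx:] (the only part idx is used for); `out.append` in DFS order = flatMap order.
-- dice[case[idx]] read with pyGetD: exact, the indices come from combinations(range(len(dice))).
def simScore (case : List Int) (dice : List (List Int)) (now : Int) : List Int :=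
  match case with
  | [] => [now]
  | i :: rest => (PySem.List.pyGetD dice i []).flatMap (fun v => simScore rest dice (now + v))

-- the dict `scores` is keyed by 0,1,…,len(dice_combinations)-1 in insertion order and only ever
-- indexed by such keys: exact as the positional list of its values.
def solution (dice : List (List Int)) : List Int :=
  let diceIdx := (List.range dice.length).map (fun (k : Nat) => (k : Int))
  let combs := PySem.List.combinations diceIdx (dice.length / 2)
  let scores := combs.map (fun case => PySem.List.sorted (simScore case dice 0) (fun x => x))
  let res := (PySem.List.enumerate scores 0).foldl
    (fun (st : Int × List Int) kv =>
      let otherCase := PySem.List.pyGetD scores ((combs.length : Int) - kv.1 - 1) []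
      let temp := kv.2.foldl (fun acc c => acc + binarySearch c otherCase) 0
      if st.1 < temp then
        (temp, (PySem.List.sorted (PySem.List.pyGetD combs kv.1 []) (fun x => x)).map (fun x => x + 1))
      else st) (0, [])
  res.2

-- ===== PORT B =====
-- the inner `while j < len(other) and other[j] < a: j += 1`
def twoPtr (other : List Int) (a : Int) (j : Nat) : Nat :=
  if h : j < other.length then
    if other.getD j 0 < a then twoPtr other a (j + 1) else j
  else j
termination_by other.length - j

def solution_alt (dice : List (List Int)) : List Int :=
  let n := dice.length
  let combs := PySem.List.combinations ((List.range n).map (fun (k : Nat) => (k : Int))) (n / 2)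
  let c := combs.length
  let sums := combs.map (fun case =>
    PySem.List.sorted
      (case.foldl (fun out i => out.flatMap (fun s => (PySem.List.pyGetD dice i []).map (fun v => s + v))) [0])
      (fun x => x))
  let res := (List.range c).foldl
    (fun (st : Int × List Int) i =>
      let mine := sums.getD i []
      let other := sums.getD (c - 1 - i) []
      let wins := (mine.foldl (fun (p : Nat × Int) a =>
          let j' := twoPtr other a p.1
          (j', p.2 + (j' : Int))) (0, 0)).2
      if st.1 < wins then (wins, (combs.getD i []).map (fun x => x + 1)) else st) (0, [])
  res.2

-- ===== PRECONDITION & SPEC =====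
def Spec_solution (dice : List (List Int)) (out : List Int) : Prop := out = solution_alt dice
instance (dice : List (List Int)) (out : List Int) : Decidable (Spec_solution dice out) := by unfold Spec_solution; infer_instance

-- ===== CLAIM (what is proved, stated in full; the proofs are below) =====
def Claim_equal_solution : Prop := ∀ (dice : List (List Int)), Dom_solution dice → Spec_solution dice (solution dice)

-- ===== LEMMAS AND PROOFS =====

-- B's product fold enumerates exactly the sums A's DFS recursion appends, in the same order.
theorem foldProd_eq (dice : List (List Int)) (case : List Int) (out : List Int) :
    case.foldl (fun out i => out.flatMap (fun s => (PySem.List.pyGetD dice i []).map (fun v => s + v))) out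
      = out.flatMap (fun s => simScore case dice s) := by
  induction case generalizing out with
  | nil => simp [simScore]
  | cons i rest ih =>
      simp only [List.foldl_cons, ih, List.flatMap_assoc, List.flatMap_map, simScore]

-- In a sorted list, position i holds a value < t iff i < countP (< t).
theorem boundary (t : Int) (l : List Int) (hs : l.Pairwise (· ≤ ·)) (i : Nat) (h : i < l.length) :
    (l[i] < t ↔ i < l.countP (fun x => decide (x < t))) := by
  induction l generalizing i with
  | nil => simp at h
  | cons x xs ih =>
      have hx := List.pairwise_cons.mp hs
      cases i with
      | zero =>
          simp only [List.getElem_cons_zero, List.countP_cons]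
          by_cases hxlt : x < t
          · have hd : (decide (x < t)) = true := decide_eq_true hxlt
            simp [hxlt]
          · have hd : (decide (x < t)) = false := decide_eq_false hxlt
            have hnone : xs.countP (fun x => decide (x < t)) = 0 :=
              List.countP_eq_zero.mpr (fun y hy => by have := hx.1 y hy; simp; omega)
            simp [hxlt, hnone]
      | succ j =>
          have hj : j < xs.length := by simpa using h
          simp only [List.getElem_cons_succ, List.countP_cons]
          by_cases hxlt : x < t
          · have hd : (decide (x < t)) = true := decide_eq_true hxlt
            rw [ih hx.2 j hj]; simp [hd]
          · have hd : (decide (x < t)) = false := decide_eq_false hxlt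
            have hnone : xs.countP (fun x => decide (x < t)) = 0 :=
              List.countP_eq_zero.mpr (fun y hy => by have := hx.1 y hy; simp; omega)
            have hy : ¬ (xs[j] < t) := by
              have := hx.1 xs[j] (List.getElem_mem hj); omega
            simp [hd, hnone, hy]

-- A's hand-written binary search over a sorted list returns the number of elements < target.
theorem bsLoop_eq (t : Int) (l : List Int) (hs : l.Pairwise (· ≤ ·)) :
    ∀ (low high : Int), 0 ≤ low → high ≤ (l.length : Int) - 1 →
      low ≤ (l.countP (fun x => decide (x < t)) : Int) →
      (l.countP (fun x => decide (x < t)) : Int) ≤ high + 1 →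
      bsLoop t l low high = (l.countP (fun x => decide (x < t)) : Int) := by
  intro low high
  fun_induction bsLoop t l low high with
  | case1 low high hle mid hlt ih =>
      intro h0 h1 h2 h3
      have hmid := PySem.Int.floordiv_two_mid_bounds hle
      have hmidr : (0:Int) ≤ mid ∧ mid < l.length := by omega
      rw [PySem.List.pyGetD_eq_getElem l 0 hmidr.1 hmidr.2] at hlt
      have hb := (boundary t l hs mid.toNat (by omega)).mp hlt
      apply ih <;> omega
  | case2 low high hle mid hge ih =>
      intro h0 h1 h2 h3
      have hmid := PySem.Int.floordiv_two_mid_bounds hle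
      have hmidr : (0:Int) ≤ mid ∧ mid < l.length := by omega
      rw [PySem.List.pyGetD_eq_getElem l 0 hmidr.1 hmidr.2] at hge
      have hb : ¬ (mid.toNat < l.countP (fun x => decide (x < t))) := fun hc => hge ((boundary t l hs mid.toNat (by omega)).mpr hc)
      apply ih <;> omega
  | case3 low high hgt =>
      intro h0 h1 h2 h3
      omega

theorem binarySearch_eq (t : Int) (l : List Int) (hs : l.Pairwise (· ≤ ·)) :
    binarySearch t l = (l.countP (fun x => decide (x < t)) : Int) := by
  have hc := @List.countP_le_length _ (fun x => decide (x < t)) l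
  exact bsLoop_eq t l hs 0 ((l.length : Int) - 1) (by omega) (by omega) (by omega) (by omega)

-- B's pointer advance lands exactly on countP (< a) whenever it starts at or before it.
theorem twoPtr_eq (other : List Int) (hs : other.Pairwise (· ≤ ·)) (a : Int) :
    ∀ j : Nat, j ≤ other.countP (fun x => decide (x < a)) → twoPtr other a j = other.countP (fun x => decide (x < a)) := by
  intro j
  have hc := @List.countP_le_length _ (fun x => decide (x < a)) other
  fun_induction twoPtr other a j with
  | case1 j hlen hlt ih =>
      intro hj
      have : other.getD j 0 = other[j] := List.getD_eq_getElem other 0 hlen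
      rw [this] at hlt
      exact ih (by have := (boundary a other hs j hlen).mp hlt; omega)
  | case2 j hlen hge =>
      intro hj
      have : other.getD j 0 = other[j] := List.getD_eq_getElem other 0 hlen
      rw [this] at hge
      have : ¬ (j < other.countP (fun x => decide (x < a))) := fun hc' => hge ((boundary a other hs j hlen).mpr hc')
      omega
  | case3 j hlen =>
      intro hj; omega

-- A's accumulation of binary-search counts over `mine`.
theorem foldA_eq (other : List Int) (hs : other.Pairwise (· ≤ ·)) (mine : List Int) :
    ∀ acc : Int, mine.foldl (fun acc c => acc + binarySearch c other) acc
      = acc + ((mine.map (fun c => (other.countP (fun x => decide (x < c)) : Int))).sum) := by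
  induction mine with
  | nil => intro acc; simp
  | cons a rest ih =>
      intro acc
      simp only [List.foldl_cons, List.map_cons, List.sum_cons, ih, binarySearch_eq a other hs]
      ring

-- B's two-pointer fold accumulates the same counts.
theorem foldB_eq (other : List Int) (hs : other.Pairwise (· ≤ ·)) (mine : List Int)
    (hm : mine.Pairwise (· ≤ ·)) :
    ∀ (j : Nat) (w : Int), (∀ a ∈ mine, j ≤ other.countP (fun x => decide (x < a))) →
      (mine.foldl (fun (p : Nat × Int) a => ((twoPtr other a p.1), p.2 + ((twoPtr other a p.1) : Int))) (j, w)).2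
        = w + ((mine.map (fun c => (other.countP (fun x => decide (x < c)) : Int))).sum) := by
  induction mine with
  | nil => intro j w _; simp
  | cons a rest ih =>
      intro j w hj
      have hpc := List.pairwise_cons.mp hm
      have hja : twoPtr other a j = other.countP (fun x => decide (x < a)) :=
        twoPtr_eq other hs a j (hj a (by simp))
      simp only [List.foldl_cons, hja]
      rw [ih hpc.2 _ _ (by
        intro b hb
        exact le_trans (List.countP_mono_left (fun x _ hx => by
          have := hpc.1 b hb; simp at hx ⊢; omega)) (le_refl _))]
      simp [List.map_cons, List.sum_cons]
      ring

-- `enumerate xs 0` as a map over range (to align A's and B's outer loops).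
theorem enumerate_eq_map_range (l : List (List Int)) :
    ∀ s : Int, PySem.List.enumerate l s = (List.range l.length).map (fun (k : Nat) => ((s + k : Int), l.getD k [])) := by
  induction l with
  | nil => intro s; simp [PySem.List.enumerate]
  | cons x t ih =>
      intro s
      simp only [PySem.List.enumerate, List.length_cons, List.range_succ_eq_map, List.map_cons,
        List.map_map, ih (s + 1)]
      rw [List.cons_eq_cons]
      refine ⟨by simp, ?_⟩
      apply List.map_congr_left
      intro k _
      simp only [Function.comp_apply, List.getD_cons_succ, Prod.mk.injEq]
      exact ⟨by push_cast; ring, trivial⟩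

-- members of combinations(range(n), r) are strictly increasing, so sorted() is the identity there.
theorem mem_combs_sorted (n r : Nat) (c : List Int)
    (hc : c ∈ PySem.List.combinations ((List.range n).map (fun (k : Nat) => (k : Int))) r) :
    PySem.List.sorted c (fun x => x) = c := by
  have hsub := PySem.List.sublist_of_mem_combinations hc
  have hlt : ((List.range n).map (fun (k : Nat) => (k : Int))).Pairwise (· < ·) := by
    rw [List.pairwise_map]
    exact List.Pairwise.imp (fun h => by exact_mod_cast h) (List.pairwise_lt_range (n := n))
  have hp : c.Pairwise (· ≤ ·) := (List.Pairwise.sublist hsub hlt).imp (fun h => le_of_lt h)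
  exact PySem.List.sorted_eq_self_of_pairwise c (fun x => x) hp

-- Pointwise: A's per-element binary-search accumulation equals B's two-pointer accumulation.
theorem temp_eq (other mine : List Int) (hs : other.Pairwise (· ≤ ·)) (hm : mine.Pairwise (· ≤ ·)) :
    mine.foldl (fun acc c => acc + binarySearch c other) 0
      = (mine.foldl (fun (p : Nat × Int) a =>
          ((twoPtr other a p.1), p.2 + ((twoPtr other a p.1) : Int))) (0, 0)).2 := by
  rw [foldA_eq other hs mine 0, foldB_eq other hs mine hm 0 0 (fun a _ => Nat.zero_le _)]

-- ===== VERDICT (by name: the statement is the Claim_ definition above) =====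
theorem solution_spec : Claim_equal_solution := by
  intro dice _
  unfold Spec_solution solution solution_alt
  dsimp only
  -- the two programs build the same list of sorted sum lists
  have hscores :
      (PySem.List.combinations ((List.range dice.length).map (fun (k : Nat) => (k : Int))) (dice.length / 2)).map
        (fun case => PySem.List.sorted (simScore case dice 0) (fun x => x))
      = (PySem.List.combinations ((List.range dice.length).map (fun (k : Nat) => (k : Int))) (dice.length / 2)).map
        (fun case => PySem.List.sorted
          (case.foldl (fun out i => out.flatMap (fun s => (PySem.List.pyGetD dice i []).map (fun v => s + v))) [0])
          (fun x => x)) := by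
    apply List.map_congr_left
    intro case _
    rw [foldProd_eq dice case [0]]
    simp
  rw [hscores]
  set combs := PySem.List.combinations ((List.range dice.length).map (fun (k : Nat) => (k : Int))) (dice.length / 2) with hcombs
  set sums := combs.map
    (fun case => PySem.List.sorted
      (case.foldl (fun out i => out.flatMap (fun s => (PySem.List.pyGetD dice i []).map (fun v => s + v))) [0])
      (fun x => x)) with hsums
  have hlen : sums.length = combs.length := List.length_map ..
  rw [enumerate_eq_map_range sums 0, List.foldl_map, hlen]
  congr 1
  apply PySem.List.foldl_congr_mem
  intro st k hk
  have hkC : k < combs.length := by simpa using hk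
  dsimp only
  -- indices
  have hidx1 : ((combs.length : Int) - (0 + (k : Int)) - 1) = (((combs.length - 1 - k : Nat)) : Int) := by
    omega
  have hidx2 : ((0 : Int) + (k : Int)) = ((k : Nat) : Int) := by ring
  rw [hidx1, hidx2, PySem.List.pyGetD_natCast, PySem.List.pyGetD_natCast]
  -- sortedness of the two sum lists involved
  have hpair : ∀ l ∈ sums, l.Pairwise (· ≤ ·) := by
    intro l hl
    rw [hsums] at hl
    obtain ⟨case, _, rfl⟩ := List.mem_map.mp hl
    exact PySem.List.sorted_pairwise _ _
  have hmine : (sums.getD k []).Pairwise (· ≤ ·) := by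
    apply hpair
    rw [List.getD_eq_getElem sums [] (by omega)]
    exact List.getElem_mem _
  have hother : (sums.getD (combs.length - 1 - k) []).Pairwise (· ≤ ·) := by
    apply hpair
    rw [List.getD_eq_getElem sums [] (by omega)]
    exact List.getElem_mem _
  rw [temp_eq _ _ hother hmine]
  -- combs[k] is strictly increasing, so A's sorted() on it is the identity
  have hsorted : PySem.List.sorted (combs.getD k []) (fun x => x) = combs.getD k [] := by
    apply mem_combs_sorted dice.length (dice.length / 2)
    rw [List.getD_eq_getElem combs [] hkC, ← hcombs]
    exact List.getElem_mem hkC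
  rw [hsorted]
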